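-- pv_equiv track=rewrite | github.com/PurshottamKumar07/AI-based-code-optimizer | main.py | dead_code_elimination
-- ===== SOURCE A (Python) =====
-- TYPE_KEYWORDS = {"int", "float", "double", "long", "short", "char", "bool",
--                  "string", "String", "var", "auto", "unsigned", "signed"}
--
-- def extract_varname(lhs):
--     """Strip C/C++/Java type keyword from LHS to get the bare variable name."""
--     parts = lhs.strip().split()
--     if len(parts) >= 2 and parts[0] in TYPE_KEYWORDS:
--         return parts[-1]   # e.g. "int x" → "x", "String name" → "name"
--     return parts[-1] if parts else lhs.strip()
--
-- def dead_code_elimination(lines):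
--     seen, result = set(), []
--     for line in reversed(lines):
--         if '=' in line:
--             lhs = line.split('=')[0]
--             var_name = extract_varname(lhs)
--             if var_name in seen:
--                 continue
--             seen.add(var_name)
--         result.append(line)
--     return list(reversed(result))
-- ===== SOURCE B (Python) =====
-- TYPE_KEYWORDS = {"int", "float", "double", "long", "short", "char", "bool",
--                  "string", "String", "var", "auto", "unsigned", "signed"}
--
-- def extract_varname(lhs):
--     """Strip C/C++/Java type keyword from LHS to get the bare variable name."""
--     parts = lhs.strip().split()
--     if len(parts) >= 2 and parts[0] in TYPE_KEYWORDS: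
--         return parts[-1]
--     return parts[-1] if parts else lhs.strip()
--
-- def dead_code_elimination(lines):
--     last_assign = {}
--     for i, line in enumerate(lines):
--         if '=' in line:
--             last_assign[extract_varname(line.split('=')[0])] = i
--     result = []
--     for i, line in enumerate(lines):
--         if '=' in line:
--             if last_assign[extract_varname(line.split('=')[0])] != i:
--                 continue
--         result.append(line)
--     return result
-- ===== Notes on version B (the rewrite author's own statement) =====
-- stated objective: alternative
-- what changed: Replaces the backward loop with a seen-set and final double reversal by two forward passes: an index table mapping each variable to its last assignment index, then a forward filter keeping an assignment line only when its index is the recorded last one.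
import Mathlib
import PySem

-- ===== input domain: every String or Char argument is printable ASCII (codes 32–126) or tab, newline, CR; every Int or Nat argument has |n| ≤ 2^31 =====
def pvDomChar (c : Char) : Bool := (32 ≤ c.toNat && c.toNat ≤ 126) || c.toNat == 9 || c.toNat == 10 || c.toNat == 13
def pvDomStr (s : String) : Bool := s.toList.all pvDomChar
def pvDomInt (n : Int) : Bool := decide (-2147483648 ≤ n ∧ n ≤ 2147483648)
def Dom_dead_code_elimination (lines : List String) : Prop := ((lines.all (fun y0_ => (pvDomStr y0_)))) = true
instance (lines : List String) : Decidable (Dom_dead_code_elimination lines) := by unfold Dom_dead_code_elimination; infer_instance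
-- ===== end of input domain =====

-- B replaces A's backward seen-set loop (plus double reversal) by two forward passes over an
-- index table of last-assignment positions; alternative decomposition, same asymptotic cost.

-- ===== PORT A =====
def TYPE_KEYWORDS : PySem.Set String :=
  PySem.Set.ofList ["int", "float", "double", "long", "short", "char", "bool",
                    "string", "String", "var", "auto", "unsigned", "signed"]

def extract_varname (lhs : String) : String :=
  let parts := PySem.Str.split₀ (PySem.Str.strip lhs)
  if 2 ≤ parts.length && PySem.Set.contains TYPE_KEYWORDS (parts.headD "") then
    (PySem.List.pyGet? parts (-1)).getD ""
  else if !parts.isEmpty then (PySem.List.pyGet? parts (-1)).getD ""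
  else PySem.Str.strip lhs

def dead_code_elimination (lines : List String) : List String :=
  let st := (lines.reverse).foldl
    (fun (st : PySem.Set String × List String) line =>
      if PySem.Str.isIn "=" line then
        let lhs := ((PySem.Str.split? line "=").getD []).headD ""
        let var_name := extract_varname lhs
        if PySem.Set.contains st.1 var_name then st
        else (PySem.Set.add st.1 var_name, st.2 ++ [line])
      else (st.1, st.2 ++ [line]))
    (PySem.Set.empty, [])
  st.2.reverse

-- ===== PORT B =====
def dead_code_elimination_alt (lines : List String) : List String :=
  let last_assign : PySem.Dict String Int :=
    (PySem.List.enumerate lines 0).foldl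
      (fun d p =>
        if PySem.Str.isIn "=" p.2 then
          d.insert (extract_varname (((PySem.Str.split? p.2 "=").getD []).headD "")) p.1
        else d)
      PySem.Dict.empty
  (PySem.List.enumerate lines 0).foldl
    (fun res p =>
      if PySem.Str.isIn "=" p.2 then
        if last_assign.getD (extract_varname (((PySem.Str.split? p.2 "=").getD []).headD "")) (-1) ≠ p.1
        then res
        else res ++ [p.2]
      else res ++ [p.2])
    []

-- ===== PRECONDITION & SPEC =====
def Spec_dead_code_elimination (lines : List String) (out : List String) : Prop := out = dead_code_elimination_alt lines
instance (lines : List String) (out : List String) : Decidable (Spec_dead_code_elimination lines out) := by unfold Spec_dead_code_elimination; infer_instance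

-- ===== CLAIM (what is proved, stated in full; the proofs are below) =====
def Claim_equal_dead_code_elimination : Prop := ∀ (lines : List String), Dom_dead_code_elimination lines → Spec_dead_code_elimination lines (dead_code_elimination lines)

-- ===== LEMMAS AND PROOFS =====

-- key of a line: the assigned variable if the line contains '=', else none
def pvKey (line : String) : Option String :=
  if PySem.Str.isIn "=" line then
    some (extract_varname (((PySem.Str.split? line "=").getD []).headD ""))
  else none

-- common specification: keep a line iff it has no key or its key is not assigned later
def pvSpecF : List String → List String
  | [] => []
  | l :: t =>
    match pvKey l with
    | none => l :: pvSpecF t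
    | some v => if v ∈ t.filterMap pvKey then pvSpecF t else l :: pvSpecF t

-- index (from the head) of the LAST line of ls whose key is v
def pvLastIdx (v : String) : List String → Option Nat
  | [] => none
  | l :: t =>
    match pvLastIdx v t with
    | some k => some (k + 1)
    | none => if pvKey l = some v then some 0 else none

-- A's loop body, verbatim (defeq to the lambda inside the port)
def pvStepA (st : PySem.Set String × List String) (line : String) :
    PySem.Set String × List String :=
  if PySem.Str.isIn "=" line then
    let lhs := ((PySem.Str.split? line "=").getD []).headD ""
    let var_name := extract_varname lhs
    if PySem.Set.contains st.1 var_name then st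
    else (PySem.Set.add st.1 var_name, st.2 ++ [line])
  else (st.1, st.2 ++ [line])

-- B's two loop bodies, verbatim
def pvStep1 (d : PySem.Dict String Int) (p : Int × String) : PySem.Dict String Int :=
  if PySem.Str.isIn "=" p.2 then
    d.insert (extract_varname (((PySem.Str.split? p.2 "=").getD []).headD "")) p.1
  else d

def pvStep2 (la : PySem.Dict String Int) (res : List String) (p : Int × String) : List String :=
  if PySem.Str.isIn "=" p.2 then
    if la.getD (extract_varname (((PySem.Str.split? p.2 "=").getD []).headD "")) (-1) ≠ p.1
    then res
    else res ++ [p.2]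
  else res ++ [p.2]

theorem pvSpecF_cons_some (l : String) (t : List String) (v : String) (hkey : pvKey l = some v) :
    pvSpecF (l :: t) = if v ∈ t.filterMap pvKey then pvSpecF t else l :: pvSpecF t := by
  rw [pvSpecF, hkey]

theorem pvSpecF_cons_none (l : String) (t : List String) (hkey : pvKey l = none) :
    pvSpecF (l :: t) = l :: pvSpecF t := by
  rw [pvSpecF, hkey]

theorem pvLastIdx_isSome (v : String) (ls : List String) :
    (pvLastIdx v ls).isSome = true ↔ v ∈ ls.filterMap pvKey := by
  induction ls with
  | nil => simp [pvLastIdx]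
  | cons l t ih =>
    simp only [pvLastIdx, List.filterMap_cons]
    cases h : pvLastIdx v t with
    | some k =>
      have hvt : v ∈ t.filterMap pvKey := by rw [← ih, h]; rfl
      cases hk : pvKey l <;> simp [hvt]
    | none =>
      have hnt : v ∉ t.filterMap pvKey := by rw [← ih, h]; simp
      cases hk : pvKey l with
      | none => simp [hnt]
      | some w =>
        by_cases hvw : w = v
        · subst hvw; simp [hnt]
        · simp only [List.mem_cons]
          rw [if_neg (by simpa using hvw)]
          simp only [Option.isSome_none, Bool.false_eq_true, false_iff, not_or]
          exact ⟨fun h => hvw h.symm, hnt⟩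

set_option maxHeartbeats 1000000 in
theorem A_invariant (lines : List String) :
    ∃ S : PySem.Set String,
      lines.foldr (fun x y => pvStepA y x) (PySem.Set.empty, [])
        = (S, (pvSpecF lines).reverse)
      ∧ ∀ v, PySem.Set.contains S v = true ↔ v ∈ lines.filterMap pvKey := by
  induction lines with
  | nil => exact ⟨PySem.Set.empty, rfl, by simp [PySem.Set.empty]⟩
  | cons l t ih =>
    obtain ⟨S, hfold, hmem⟩ := ih
    rw [List.foldr_cons, hfold]
    by_cases hin : PySem.Str.isIn "=" l = true
    · have hkey : pvKey l = some (extract_varname (((PySem.Str.split? l "=").getD []).headD "")) := by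
        unfold pvKey; rw [if_pos hin]
      generalize hv : extract_varname (((PySem.Str.split? l "=").getD []).headD "") = v at hkey
      by_cases hc : PySem.Set.contains S v = true
      · refine ⟨S, ?_, ?_⟩
        · have hvt : v ∈ t.filterMap pvKey := (hmem v).mp hc
          show pvStepA (S, (pvSpecF t).reverse) l = _
          unfold pvStepA
          simp only
          rw [if_pos hin, hv, if_pos hc, pvSpecF_cons_some l t v hkey, if_pos hvt]
        · intro w
          rw [hmem w]
          simp only [List.filterMap_cons, hkey, List.mem_cons]
          constructor
          · intro h; right; exact h
          · rintro (h | h)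
            · rw [h]; exact (hmem v).mp hc
            · exact h
      · refine ⟨PySem.Set.add S v, ?_, ?_⟩
        · have hvt : v ∉ t.filterMap pvKey := fun h => hc ((hmem v).mpr h)
          show pvStepA (S, (pvSpecF t).reverse) l = _
          unfold pvStepA
          simp only
          rw [if_pos hin, hv, if_neg hc, pvSpecF_cons_some l t v hkey, if_neg hvt, List.reverse_cons]
        · intro w
          rw [PySem.Set.contains_iff, PySem.Set.mem_add, ← PySem.Set.contains_iff, hmem w]
          simp only [List.filterMap_cons, hkey, List.mem_cons]
          exact Or.comm
    · have hkey : pvKey l = none := by unfold pvKey; rw [if_neg hin]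
      refine ⟨S, ?_, ?_⟩
      · show pvStepA (S, (pvSpecF t).reverse) l = _
        unfold pvStepA
        simp only
        rw [if_neg hin, pvSpecF_cons_none l t hkey, List.reverse_cons]
      · intro w; rw [hmem w]; simp [hkey]

theorem A_eq_specF (lines : List String) : dead_code_elimination lines = pvSpecF lines := by
  have h : dead_code_elimination lines
      = ((lines.reverse).foldl pvStepA (PySem.Set.empty, [])).2.reverse := rfl
  rw [h, List.foldl_reverse]
  obtain ⟨S, hfold, -⟩ := A_invariant lines
  rw [hfold]
  simp

theorem B_pass1 (ls : List String) (d : PySem.Dict String Int) (i0 : Int) (v : String) :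
    ((PySem.List.enumerate ls i0).foldl pvStep1 d).get? v
    = match pvLastIdx v ls with
      | some k => some (i0 + k)
      | none => d.get? v := by
  induction ls generalizing d i0 with
  | nil => simp [PySem.List.enumerate_nil, pvLastIdx]
  | cons l t ih =>
    rw [PySem.List.enumerate_cons, List.foldl_cons, ih]
    by_cases hin : PySem.Str.isIn "=" l = true
    · have hkey : pvKey l = some (extract_varname (((PySem.Str.split? l "=").getD []).headD "")) := by
        unfold pvKey; rw [if_pos hin]
      set w := extract_varname (((PySem.Str.split? l "=").getD []).headD "") with hw
      have hstep : pvStep1 d (i0, l) = d.insert w i0 := by unfold pvStep1; rw [if_pos hin]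
      rw [hstep]
      cases h : pvLastIdx v t with
      | some k =>
        simp only [pvLastIdx, h]
        push_cast
        ring_nf
      | none =>
        simp only [pvLastIdx, h, hkey]
        by_cases hvw : w = v
        · subst hvw
          rw [if_pos rfl, PySem.Dict.get?_insert_self]
          simp
        · rw [if_neg (by simpa using hvw), PySem.Dict.get?_insert_of_ne d _ (by simpa using Ne.symm hvw)]
    · have hkey : pvKey l = none := by unfold pvKey; rw [if_neg hin]
      have hstep : pvStep1 d (i0, l) = d := by unfold pvStep1; rw [if_neg hin]
      rw [hstep]
      cases h : pvLastIdx v t with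
      | some k => simp only [pvLastIdx, h]; push_cast; ring_nf
      | none => simp [pvLastIdx, h, hkey]

theorem B_pass2 (la : PySem.Dict String Int) (ls : List String) (i0 : Int) (acc : List String)
    (H : ∀ v, v ∈ ls.filterMap pvKey → la.get? v = (pvLastIdx v ls).map (fun k : Nat => i0 + (k : Int))) :
    (PySem.List.enumerate ls i0).foldl (pvStep2 la) acc = acc ++ pvSpecF ls := by
  induction ls generalizing i0 acc with
  | nil => simp [PySem.List.enumerate_nil, pvSpecF]
  | cons l t ih =>
    rw [PySem.List.enumerate_cons, List.foldl_cons]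
    have Ht : ∀ v, v ∈ t.filterMap pvKey → la.get? v = (pvLastIdx v t).map (fun k : Nat => (i0 + 1) + (k : Int)) := by
      intro v hv
      have hk : (pvLastIdx v t).isSome = true := (pvLastIdx_isSome v t).mpr hv
      cases h : pvLastIdx v t with
      | none => rw [h] at hk; simp at hk
      | some k =>
        have hcons : pvLastIdx v (l :: t) = some (k + 1) := by simp [pvLastIdx, h]
        have := H v (by simp only [List.filterMap_cons]; cases pvKey l <;> simp [hv])
        rw [hcons] at this
        rw [this]
        simp only [Option.map_some, Option.some.injEq]
        push_cast
        ring
    by_cases hin : PySem.Str.isIn "=" l = true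
    · have hkey : pvKey l = some (extract_varname (((PySem.Str.split? l "=").getD []).headD "")) := by
        unfold pvKey; rw [if_pos hin]
      generalize hv : extract_varname (((PySem.Str.split? l "=").getD []).headD "") = v at hkey
      have hmemc : v ∈ (l :: t).filterMap pvKey := by
        simp [hkey]
      by_cases hvt : v ∈ t.filterMap pvKey
      · -- a later assignment to v exists: A drops the line; dict points past i0
        obtain ⟨k, hk⟩ : ∃ k, pvLastIdx v t = some k := by
          have := (pvLastIdx_isSome v t).mpr hvt
          cases h : pvLastIdx v t with
          | none => rw [h] at this; simp at this
          | some k => exact ⟨k, rfl⟩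
        have hla : la.getD v (-1) = i0 + (k + 1 : Nat) := by
          have := H v hmemc
          rw [show pvLastIdx v (l :: t) = some (k + 1) by simp [pvLastIdx, hk]] at this
          rw [PySem.Dict.getD_eq_get?_getD, this]
          simp
        have hstep : pvStep2 la acc (i0, l) = acc := by
          unfold pvStep2
          simp only
          rw [if_pos hin, hv]
          rw [if_pos (by rw [hla]; push_cast; omega)]
        rw [hstep, ih (i0 + 1) acc Ht]
        rw [pvSpecF_cons_some l t v hkey, if_pos hvt]
      · -- this is the last assignment to v: dict points exactly at i0
        have hlast : pvLastIdx v (l :: t) = some 0 := by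
          have hnone : pvLastIdx v t = none := by
            cases h : pvLastIdx v t with
            | none => rfl
            | some k =>
              exact absurd ((pvLastIdx_isSome v t).mp (by rw [h]; rfl)) hvt
          simp [pvLastIdx, hnone, hkey]
        have hla : la.getD v (-1) = i0 := by
          have := H v hmemc
          rw [hlast] at this
          rw [PySem.Dict.getD_eq_get?_getD, this]
          simp
        have hstep : pvStep2 la acc (i0, l) = acc ++ [l] := by
          unfold pvStep2
          simp only
          rw [if_pos hin, hv]
          rw [if_neg (by rw [hla]; simp)]
        rw [hstep, ih (i0 + 1) (acc ++ [l]) Ht]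
        rw [pvSpecF_cons_some l t v hkey, if_neg hvt]
        simp
    · have hkey : pvKey l = none := by unfold pvKey; rw [if_neg hin]
      have hstep : pvStep2 la acc (i0, l) = acc ++ [l] := by
        unfold pvStep2; rw [if_neg hin]
      rw [hstep, ih (i0 + 1) (acc ++ [l]) Ht]
      rw [pvSpecF_cons_none l t hkey]
      simp

theorem B_eq_specF (lines : List String) : dead_code_elimination_alt lines = pvSpecF lines := by
  have h : dead_code_elimination_alt lines
      = (PySem.List.enumerate lines 0).foldl
          (pvStep2 ((PySem.List.enumerate lines 0).foldl pvStep1 PySem.Dict.empty)) [] := rfl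
  rw [h]
  refine (B_pass2 _ lines 0 [] ?_).trans (by simp)
  intro v hv
  have hk : (pvLastIdx v lines).isSome = true := (pvLastIdx_isSome v lines).mpr hv
  cases hidx : pvLastIdx v lines with
  | none => rw [hidx] at hk; simp at hk
  | some k =>
    rw [B_pass1 lines PySem.Dict.empty 0 v, hidx]
    simp

-- ===== VERDICT (by name: the statement is the Claim_ definition above) =====
theorem dead_code_elimination_spec : Claim_equal_dead_code_elimination := by
  intro lines _
  unfold Spec_dead_code_elimination
  rw [A_eq_specF, B_eq_specF]
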